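-- pv_equiv track=rewrite | github.com/CharleezGithub/RISC-V-simulator-FPGA | tools/programLoader.py | pick_best_window
-- ===== SOURCE A (Python) =====
-- def compare_regs(expected, actual):
--     mismatches = []
--     for i, (exp, act) in enumerate(zip(expected, actual)):
--         if exp != act:
--             mismatches.append((i, exp, act))
--     return mismatches
--
-- def pick_best_window(expected, received):
--     window_len = len(expected)
--     if len(received) < window_len:
--         return None, None, None
--
--     best_start = 0
--     best_window = received[:window_len]
--     best_mismatches = compare_regs(expected, best_window)
--     if not best_mismatches:
--         return best_start, best_window, best_mismatches
--
--     for start in range(1, len(received) - window_len + 1):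
--         window = received[start : start + window_len]
--         mismatches = compare_regs(expected, window)
--         if len(mismatches) < len(best_mismatches):
--             best_start = start
--             best_window = window
--             best_mismatches = mismatches
--             if not best_mismatches:
--                 break
--
--     return best_start, best_window, best_mismatches
-- ===== SOURCE B (Python) =====
-- def pick_best_window(expected, received):
--     m = len(expected)
--     n = len(received)
--     if n < m:
--         return None, None, None
--     # one mismatch counter per window start, filled column-by-column
--     cnts = [0] * (n - m + 1)
--     for i, e in enumerate(expected):
--         cnts = [c + (e != received[s + i]) for s, c in enumerate(cnts)]
--     best = cnts.index(min(cnts))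
--     window = received[best : best + m]
--     mismatches = [(i, e, a) for i, (e, a) in enumerate(zip(expected, window)) if e != a]
--     return best, window, mismatches
-- ===== Notes on version B (the rewrite author's own statement) =====
-- stated objective: alternative
-- what changed: B replaces A's per-window rescan with a running best and early break by a column-wise mismatch-count array over all window starts, then one index(min(...)) selection and a single window reconstruction.
import Mathlib
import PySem

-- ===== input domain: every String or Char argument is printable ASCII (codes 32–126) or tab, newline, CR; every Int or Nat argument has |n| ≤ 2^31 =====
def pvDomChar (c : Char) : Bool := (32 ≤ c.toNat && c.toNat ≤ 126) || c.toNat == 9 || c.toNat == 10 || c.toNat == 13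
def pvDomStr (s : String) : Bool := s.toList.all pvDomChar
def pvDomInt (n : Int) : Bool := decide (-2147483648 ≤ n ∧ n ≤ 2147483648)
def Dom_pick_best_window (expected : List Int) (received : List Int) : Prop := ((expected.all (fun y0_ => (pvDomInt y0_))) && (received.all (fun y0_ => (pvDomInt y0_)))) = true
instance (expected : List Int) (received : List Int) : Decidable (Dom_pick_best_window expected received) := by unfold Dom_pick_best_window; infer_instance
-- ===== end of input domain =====

-- B replaces A's per-window rescan-with-running-best by a column-wise mismatch-count
-- array plus a single index(min(...)) selection: an alternative traversal, same results.

-- ===== PORT A =====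
def compare_regs (expected : List Int) (actual : List Int) : List (Int × Int × Int) :=
  (PySem.List.enumerate (expected.zip actual)).foldl
    (fun acc p => if p.2.1 ≠ p.2.2 then acc ++ [(p.1, p.2.1, p.2.2)] else acc) []

-- the 'for start in range(1, …)' loop of A, with Python's break as an early return
def pbwLoop (expected : List Int) (received : List Int) (window_len : Int) :
    List Int → (Int × List Int × List (Int × Int × Int)) → (Int × List Int × List (Int × Int × Int))
  | [], st => st
  | start :: rest, st =>
      let window := PySem.List.slice received (some start) (some (start + window_len))
      let mismatches := compare_regs expected window
      if mismatches.length < st.2.2.length then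
        if mismatches = [] then (start, window, mismatches)
        else pbwLoop expected received window_len rest (start, window, mismatches)
      else pbwLoop expected received window_len rest st

def pick_best_window (expected : List Int) (received : List Int) :
    Option Int × Option (List Int) × (Option (List (Int × Int × Int))) :=
  let window_len : Int := (expected.length : Int)
  if (received.length : Int) < window_len then (none, none, none)
  else
    let best_start : Int := 0
    let best_window := PySem.List.slice received none (some window_len)
    let best_mismatches := compare_regs expected best_window
    if best_mismatches = [] then (some best_start, some best_window, some best_mismatches)
    else
      let r := pbwLoop expected received window_len
        (PySem.List.pyRange 1 ((received.length : Int) - window_len + 1) 1)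
        (best_start, best_window, best_mismatches)
      (some r.1, some r.2.1, some r.2.2)

-- ===== PORT B =====
def pick_best_window_alt (expected : List Int) (received : List Int) :
    Option Int × Option (List Int) × (Option (List (Int × Int × Int))) :=
  let m := expected.length
  let n := received.length
  if (n : Int) < (m : Int) then (none, none, none)
  else
    -- cnts = [0] * (n - m + 1), then filled column by column
    let cnts : List Int :=
      (PySem.List.enumerate expected).foldl
        (fun cnts p =>
          (PySem.List.enumerate cnts).map
            (fun q => q.2 + (if p.2 ≠ PySem.List.pyGetD received (q.1 + p.1) 0 then 1 else 0)))
        (List.replicate (n - m + 1) 0)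
    -- received[s+i] is always in range here, so pyGetD's default is never used
    -- best = cnts.index(min(cnts)); cnts is nonempty, so min/index never raise
    let mn := (PySem.List.min? cnts (fun x => x)).getD 0
    let best := (PySem.List.index? cnts mn).getD 0
    let window := PySem.List.slice received (some (best : Int)) (some ((best : Int) + (m : Int)))
    let mismatches :=
      (PySem.List.enumerate (expected.zip window)).foldl
        (fun acc p => if p.2.1 ≠ p.2.2 then acc ++ [(p.1, p.2.1, p.2.2)] else acc) []
    (some (best : Int), some window, some mismatches)

-- ===== PRECONDITION & SPEC =====
def Spec_pick_best_window (expected : List Int) (received : List Int) (out : Option Int × Option (List Int) × (Option (List (Int × Int × Int)))) : Prop := out = pick_best_window_alt expected received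
instance (expected : List Int) (received : List Int) (out : Option Int × Option (List Int) × (Option (List (Int × Int × Int)))) : Decidable (Spec_pick_best_window expected received out) := by unfold Spec_pick_best_window; infer_instance

-- ===== CLAIM (what is proved, stated in full; the proofs are below) =====
def Claim_equal_pick_best_window : Prop := ∀ (expected : List Int) (received : List Int), Dom_pick_best_window expected received → Spec_pick_best_window expected received (pick_best_window expected received)

-- ===== LEMMAS AND PROOFS =====

-- proof-only abbreviations: the window at start s, its mismatch list and count
def pvWin (received : List Int) (m s : Nat) : List Int := (received.drop s).take m
def pvF (expected received : List Int) (s : Nat) : List (Int × Int × Int) :=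
  compare_regs expected (pvWin received expected.length s)
def pvG (expected received : List Int) (s : Nat) : Nat := (pvF expected received s).length

-- s is the first start (among the k windows) minimizing the mismatch count
def pvFirstMin (expected received : List Int) (k s : Nat) : Prop :=
  s < k ∧ (∀ j < k, pvG expected received s ≤ pvG expected received j) ∧
    (∀ j < s, pvG expected received s < pvG expected received j)

theorem pvFirstMin_unique {expected received : List Int} {k s1 s2 : Nat}
    (h1 : pvFirstMin expected received k s1) (h2 : pvFirstMin expected received k s2) :
    s1 = s2 := by
  obtain ⟨hk1, hmin1, hfst1⟩ := h1
  obtain ⟨hk2, hmin2, hfst2⟩ := h2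
  rcases lt_trichotomy s1 s2 with h | h | h
  · exact absurd (hmin1 s2 hk2) (by simpa using hfst2 s1 h)
  · exact h
  · exact absurd (hmin2 s1 hk1) (by simpa using hfst1 s2 h)

theorem compare_regs_eq_filter (expected actual : List Int) :
    compare_regs expected actual =
      (PySem.List.enumerate (expected.zip actual)).filter (fun p => p.2.1 ≠ p.2.2) := by
  unfold compare_regs
  rw [PySem.List.foldl_append_ite_eq_filter]
  simp

theorem countP_enum {α : Type} (xs : List α) (t : Int) (q : α → Bool) :
    ((PySem.List.enumerate xs t).countP (fun p => q p.2)) = xs.countP q := by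
  induction xs generalizing t with
  | nil => simp [PySem.List.enumerate_nil]
  | cons x l ih => simp [PySem.List.enumerate_cons, List.countP_cons, ih]

theorem length_compare_regs (expected actual : List Int) :
    (compare_regs expected actual).length = (expected.zip actual).countP (fun p => p.1 ≠ p.2) := by
  rw [compare_regs_eq_filter, ← List.countP_eq_length_filter]
  exact countP_enum (expected.zip actual) 0 (fun z => decide (z.1 ≠ z.2))

theorem zip_take_len {α β : Type} (e : List α) (w : List β) : e.zip (w.take e.length) = e.zip w := by
  induction e generalizing w with
  | nil => simp
  | cons x l ih => cases w with
    | nil => simp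
    | cons y t => simp [List.zip_cons_cons, ih]

theorem enum_map_enum {α β : Type} (L : List α) (G : Int × α → β) (t : Int) :
    PySem.List.enumerate ((PySem.List.enumerate L t).map G) t
      = (PySem.List.enumerate L t).map (fun q => (q.1, G q)) := by
  induction L generalizing t with
  | nil => simp [PySem.List.enumerate_nil]
  | cons x l ih => simp [PySem.List.enumerate_cons, ih]

theorem foldl_enum_map {α : Type} (l : List α) (h : α → Int → Int) (L : List Int) :
    l.foldl (fun arr x => (PySem.List.enumerate arr).map (fun q => q.2 + h x q.1)) L
      = (PySem.List.enumerate L).map (fun q => q.2 + (l.map (fun x => h x q.1)).sum) := by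
  induction l generalizing L with
  | nil => simp
  | cons x tl ih =>
      simp only [List.foldl_cons, ih, enum_map_enum, List.map_map]
      refine List.map_congr_left ?_
      intro q hq
      simp [List.sum_cons]
      ring

theorem enum_replicate (k : Nat) (c : Int) (t : Int) :
    PySem.List.enumerate (List.replicate k c) t
      = (List.range k).map (fun (j : Nat) => (t + (j : Int), c)) := by
  induction k generalizing t with
  | zero => simp [PySem.List.enumerate_nil]
  | succ n ih =>
      rw [List.replicate_succ, PySem.List.enumerate_cons, ih, List.range_succ_eq_map,
        List.map_cons, List.map_map]
      refine List.cons_eq_cons.mpr ⟨by norm_num, List.map_congr_left ?_⟩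
      intro j hj
      simp only [Function.comp_apply]
      push_cast
      ring_nf

theorem sum_ind (rec e : List Int) (s t : Nat) (h : s + t + e.length ≤ rec.length) :
    ((PySem.List.enumerate e (t : Int)).map
        (fun p => if p.2 ≠ PySem.List.pyGetD rec ((s : Int) + p.1) 0 then (1 : Int) else 0)).sum
      = ((e.zip (rec.drop (s + t))).countP (fun p => p.1 ≠ p.2) : Int) := by
  induction e generalizing t with
  | nil => simp [PySem.List.enumerate_nil]
  | cons x l ih =>
      have hlt : s + t < rec.length := by simp at h; omega
      rw [PySem.List.enumerate_cons, List.map_cons, List.sum_cons]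
      have hcast : (s : Int) + (t : Int) = ((s + t : Nat) : Int) := by push_cast; ring
      rw [hcast, PySem.List.pyGetD_natCast]
      rw [List.drop_eq_getElem_cons hlt, List.zip_cons_cons, List.countP_cons]
      have htl := ih (t + 1) (by simp at h ⊢; omega)
      have hc1 : ((t : Int) + 1) = ((t + 1 : Nat) : Int) := by push_cast; ring
      have hst : s + (t + 1) = s + t + 1 := by omega
      rw [hst] at htl
      rw [hc1, htl]
      have hg : rec.getD (s + t) 0 = rec[s + t] := List.getD_eq_getElem _ _ hlt
      rw [hg]
      push_cast
      by_cases hx : x = rec[s + t] <;> simp [hx] <;> ring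

-- B's cnts array lists the mismatch counts
theorem cnts_eq (expected received : List Int) (hmn : expected.length ≤ received.length) :
    (PySem.List.enumerate expected).foldl
        (fun cnts p =>
          (PySem.List.enumerate cnts).map
            (fun q => q.2 + (if p.2 ≠ PySem.List.pyGetD received (q.1 + p.1) 0 then 1 else 0)))
        (List.replicate (received.length - expected.length + 1) 0)
      = (List.range (received.length - expected.length + 1)).map
          (fun (s : Nat) => (pvG expected received s : Int)) := by
  rw [foldl_enum_map (PySem.List.enumerate expected)
      (fun x s => if x.2 ≠ PySem.List.pyGetD received (s + x.1) 0 then 1 else 0),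
    enum_replicate, List.map_map]
  refine List.map_congr_left ?_
  intro j hj
  simp only [Function.comp_apply, zero_add]
  have h := sum_ind received expected j 0 (by simp at hj ⊢; omega)
  simp only [Nat.cast_zero, Nat.add_zero] at h
  rw [h]
  unfold pvG pvF pvWin
  rw [length_compare_regs, zip_take_len]

-- A's loop computes the first minimum
theorem pbwLoop_spec (expected received : List Int) (k : Nat)
    (hk : k ≤ received.length - expected.length + 1) (hmn : expected.length ≤ received.length)
    (fuel t : Nat) (hft : k - t ≤ fuel) (ht : 1 ≤ t) (htk : t ≤ k) (bs : Nat) (hbs : bs < t)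
    (hmin : ∀ j < t, pvG expected received bs ≤ pvG expected received j)
    (hfst : ∀ j < bs, pvG expected received bs < pvG expected received j)
    (hne : pvF expected received bs ≠ []) :
    ∃ s, pvFirstMin expected received k s ∧
      pbwLoop expected received (expected.length : Int)
        (PySem.List.pyRange (t : Int) (k : Int) 1)
        ((bs : Int), pvWin received expected.length bs, pvF expected received bs)
      = ((s : Int), pvWin received expected.length s, pvF expected received s) := by
  induction fuel generalizing t bs with
  | zero =>
      have htk' : t = k := by omega
      subst htk'
      rw [PySem.List.pyRange_one_eq_nil (by omega)]
      exact ⟨bs, ⟨by omega, fun j hj => hmin j hj, hfst⟩, rfl⟩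
  | succ n ih =>
      by_cases hlt : t < k
      · rw [PySem.List.pyRange_one_cons (by exact_mod_cast hlt), pbwLoop]
        simp only [PySem.List.slice_natCast_add]
        have hwin : (received.drop t).take expected.length = pvWin received expected.length t := rfl
        rw [hwin]
        have hmism : compare_regs expected (pvWin received expected.length t)
            = pvF expected received t := rfl
        rw [hmism]
        by_cases hcase : (pvF expected received t).length < (pvF expected received bs).length
        · simp only [hcase, if_true]
          by_cases hz : pvF expected received t = []
          · simp only [hz, if_true]
            refine ⟨t, ⟨hlt, ?_, ?_⟩, by rw [hz]⟩
            · intro j hj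
              have : pvG expected received t = 0 := by simp [pvG, hz]
              omega
            · intro j hj
              have hzt : pvG expected received t = 0 := by simp [pvG, hz]
              have hbne : pvG expected received bs ≠ 0 := by
                simp [pvG]; exact hne
              have := hmin j hj
              omega
          · simp only [hz, if_false]
            exact ih t.succ (by omega) (by omega) (by omega) t (by omega)
              (fun j hj => by
                rcases Nat.lt_succ_iff_lt_or_eq.mp hj with h | h
                · exact le_trans (le_of_lt hcase) (hmin j h)
                · subst h; exact le_refl _)
              (fun j hj => lt_of_lt_of_le hcase (hmin j hj)) hz
        · simp only [hcase, if_false]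
          exact ih t.succ (by omega) (by omega) (by omega) bs (by omega)
            (fun j hj => by
              rcases Nat.lt_succ_iff_lt_or_eq.mp hj with h | h
              · exact hmin j h
              · have hle : (pvF expected received bs).length ≤ (pvF expected received t).length := by
                  omega
                rw [h]
                exact hle)
            hfst hne
      · have htk' : t = k := by omega
        rw [PySem.List.pyRange_one_eq_nil (by omega)]
        subst htk'
        exact ⟨bs, ⟨by omega, fun j hj => hmin j hj, hfst⟩, rfl⟩

-- B's index(min(cnts)) is the first minimum
theorem alt_best_firstMin (expected received : List Int) (hmn : expected.length ≤ received.length) :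
    ∃ s, pvFirstMin expected received (received.length - expected.length + 1) s ∧
      pick_best_window_alt expected received =
        (some (s : Int), some (pvWin received expected.length s), some (pvF expected received s)) := by
  set k := received.length - expected.length + 1 with hkdef
  set C := (List.range k).map (fun (s : Nat) => (pvG expected received s : Int)) with hCdef
  have hClen : C.length = k := by simp [hCdef]
  have hCne : C ≠ [] := List.ne_nil_of_length_pos (by omega)
  have hCget : ∀ (j : Nat) (hj : j < C.length), C[j] = (pvG expected received j : Int) := by
    intro j hj
    simp [hCdef]
  cases hmin : PySem.List.min? C (fun x => x) with
  | none => exact absurd ((PySem.List.min?_eq_none_iff _ _).mp hmin) hCne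
  | some mn =>
  have hmem : mn ∈ C := PySem.List.min?_mem hmin
  have hisMin : ∀ y ∈ C, mn ≤ y := PySem.List.min?_isMin hmin
  obtain ⟨b, hidx⟩ := Option.isSome_iff_exists.mp ((PySem.List.index?_isSome_iff _ _).mpr hmem)
  obtain ⟨hbC, hbv, hbfst⟩ := PySem.List.getElem_of_index?_eq_some hidx
  refine ⟨b, ⟨by omega, ?_, ?_⟩, ?_⟩
  · intro j hj
    have hjC : j < C.length := by omega
    have h1 : mn ≤ C[j] := hisMin _ (List.getElem_mem hjC)
    rw [hCget j hjC] at h1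
    rw [hCget b hbC] at hbv
    omega
  · intro j hj
    have hjC : j < C.length := by omega
    have h1 : mn ≤ C[j] := hisMin _ (List.getElem_mem hjC)
    have h2 : C[j] ≠ mn := hbfst j hj
    rw [hCget j hjC] at h1 h2
    rw [hCget b hbC] at hbv
    omega
  · have hcond : ¬ ((received.length : Int) < (expected.length : Int)) := by
      exact_mod_cast not_lt.mpr hmn
    unfold pick_best_window_alt
    rw [if_neg hcond]
    have hcnts := cnts_eq expected received hmn
    rw [← hkdef, ← hCdef] at hcnts
    simp only [← hkdef]
    simp only [hcnts, hmin, Option.getD_some, hidx, PySem.List.slice_natCast_add]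
    rfl

theorem a_eq_b (expected received : List Int) :
    pick_best_window expected received = pick_best_window_alt expected received := by
  by_cases hmn : expected.length ≤ received.length
  · have hcond : ¬ ((received.length : Int) < (expected.length : Int)) := by
      exact_mod_cast not_lt.mpr hmn
    obtain ⟨sB, hFMB, hBeq⟩ := alt_best_firstMin expected received hmn
    unfold pick_best_window
    rw [if_neg hcond]
    simp only [PySem.List.slice_to_natCast]
    have hw0 : received.take expected.length = pvWin received expected.length 0 := rfl
    rw [hw0]
    by_cases hz : pvF expected received 0 = []
    · rw [if_pos (show compare_regs expected (pvWin received expected.length 0) = [] from hz)]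
      have h0 : pvG expected received 0 = 0 := by simp [pvG, hz]
      have hFM0 : pvFirstMin expected received (received.length - expected.length + 1) 0 :=
        ⟨by omega, fun j hj => by omega, fun j hj => absurd hj (Nat.not_lt_zero j)⟩
      have hs : sB = 0 := pvFirstMin_unique hFMB hFM0
      rw [hBeq, hs]
      rfl
    · rw [if_neg (show ¬ compare_regs expected (pvWin received expected.length 0) = [] from hz)]
      have hcast : (received.length : Int) - (expected.length : Int) + 1
          = ((received.length - expected.length + 1 : Nat) : Int) := by omega
      rw [hcast]
      obtain ⟨sA, hFMA, hloop⟩ := pbwLoop_spec expected received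
        (received.length - expected.length + 1) (le_refl _) hmn
        (received.length - expected.length + 1) 1 (by omega) (le_refl _) (by omega)
        0 (by omega)
        (fun j hj => by
          have hj0 : j = 0 := by omega
          subst hj0
          exact le_refl _)
        (fun j hj => absurd hj (Nat.not_lt_zero j)) hz
      have hloop' : pbwLoop expected received (expected.length : Int)
          (PySem.List.pyRange ((1 : Nat) : Int) ((received.length - expected.length + 1 : Nat) : Int) 1)
          (((0 : Nat) : Int), pvWin received expected.length 0, pvF expected received 0)
          = ((sA : Int), pvWin received expected.length sA, pvF expected received sA) := hloop
      rw [show ((1 : Nat) : Int) = (1 : Int) from rfl] at hloop'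
      rw [show (((0 : Nat) : Int), pvWin received expected.length 0, pvF expected received 0)
            = ((0 : Int), pvWin received expected.length 0, pvF expected received 0) from rfl] at hloop'
      rw [show compare_regs expected (pvWin received expected.length 0)
            = pvF expected received 0 from rfl]
      rw [hloop']
      have hs : sB = sA := pvFirstMin_unique hFMB hFMA
      rw [hBeq, hs]
  · have hcond : ((received.length : Int) < (expected.length : Int)) := by
      exact_mod_cast not_le.mp hmn
    unfold pick_best_window pick_best_window_alt
    rw [if_pos hcond, if_pos hcond]

-- ===== VERDICT (by name: the statement is the Claim_ definition above) =====
theorem pick_best_window_spec : Claim_equal_pick_best_window := by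
  intro expected received _
  exact a_eq_b expected received
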